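-- pv_equiv track=rewrite | github.com/martijnbentum/region | utils/query_hints.py | text_to_unigrams
-- ===== SOURCE A (Python) =====
-- from collections import Counter
-- import string
--
-- punctuation = string.punctuation + '“”«»’'
--
-- STOPWORDS = frozenset({
--     'a', 'about', 'above', 'after', 'again', 'against', 'all', 'also', 'am',
--     'an', 'and', 'any', 'are', 'as', 'at', 'be', 'because', 'been', 'before',
--     'being', 'below', 'between', 'both', 'but', 'by', 'can', 'could', 'dans',
--     'de', 'der', 'des', 'die', 'dit', 'do', 'does', 'doing', 'don', 'down',
--     'du', 'during', 'een', 'eens', 'en', 'er', 'es', 'est', 'et', 'few',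
--     'for', 'from', 'further', 'had', 'has', 'have', 'having', 'he', 'her',
--     'here', 'hers', 'herself', 'het', 'him', 'himself', 'his', 'how', 'ich',
--     'if', 'ik', 'il', 'ils', 'im', 'in', 'into', 'is', 'it', 'its', 'itself',
--     'je', 'jij', 'jusqu', 'la', 'le', 'les', 'me', 'meer', 'met', 'mich',
--     'mijn', 'moi', 'mon', 'most', 'my', 'myself', 'naar', 'nach', 'ne', 'niet',
--     'no', 'nor', 'not', 'nous', 'of', 'off', 'om', 'on', 'once', 'ons',
--     'onze', 'ook', 'or', 'other', 'our', 'ours', 'ourselves', 'out', 'over',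
--     'own', 'pas', 'pour', 'same', 'sich', 'sie', 'so', 'some', 'son', 'such',
--     'sur', 'te', 'than', 'that', 'the', 'their', 'theirs', 'them',
--     'themselves', 'then', 'there', 'these', 'they', 'this', 'those', 'through',
--     'to', 'too', 'under', 'und', 'une', 'up', 'van', 'very', 'via', 'von',
--     'voor', 'was', 'wat', 'we', 'weer', 'werden', 'what', 'when', 'where',
--     'which', 'while', 'wie', 'wij', 'will', 'with', 'worden', 'would', 'you',
--     'your', 'yours', 'yourself', 'yourselves', 'ze', 'zelf', 'zich', 'zij',
--     'zo', 'zu'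
-- })
--
-- def handle_stop_words(words):
--     output = []
--     for word in words:
--         w = word.lower()
--         if w in STOPWORDS: continue
--         output.append(word)
--     return output
--
-- def check_start(word):
--     remove_char = 0
--     for word_character in word:
--         if word_character not in punctuation: break
--         else: remove_char += 1
--     if remove_char == 0: return word
--     if len(word) <= remove_char: return ''
--     return word[remove_char:]
--
-- def check_end(word):
--     remove_char = 0
--     for word_character in word[::-1]:
--         if word_character not in punctuation: break
--         else: remove_char += 1
--     if remove_char == 0: return word
--     if len(word) <= remove_char: return ''
--     return word[:-1*remove_char]
--
-- def handle_punctuation(words):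
--     output = []
--     for word in words:
--         word = check_start(word)
--         word = check_end(word)
--         if not word: continue
--         if '.' in word: continue
--         output.append(word)
--     return output
--
-- def handle_word_length(words):
--     output = []
--     for word in words:
--         if len(word) < 4: continue
--         output.append(word)
--     return output
--
-- def handle_comma_and_dash(words):
--     output= []
--     for word in words:
--         if ',' in word: output.extend(word.split(','))
--         elif '_' in word: output.extend(word.split('_'))
--         elif '--' in word: output.extend(word.split('--'))
--         else: output.append(word)
--     return output
--
-- def handle_weird_words(words):
--     output= []
--     for word in words:
--         if word.startswith('0'): continue
--         output.append(word)
--     return output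
--
-- def text_to_unigrams(text):
--     text = text.replace('\r\n',' ')
--     text = text.replace('\n',' ')
--     words = [word for word in text.split(' ') if word]
--     words = handle_comma_and_dash(words)
--     words = handle_weird_words(words)
--     words = handle_punctuation(words)
--     words = handle_word_length(words)
--     words = handle_stop_words(words)
--     words = [word.lower() for word in words]
--     return Counter(words)
-- ===== SOURCE B (Python) =====
-- from collections import Counter
--
-- STOPWORDS = frozenset(
--     "a about above after again against all also am an and any are as at be "
--     "because been before being below between both but by can could dans de "
--     "der des die dit do does doing don down du during een eens en er es est "
--     "et few for from further had has have having he her here hers herself "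
--     "het him himself his how ich if ik il ils im in into is it its itself "
--     "je jij jusqu la le les me meer met mich mijn moi mon most my myself "
--     "naar nach ne niet no nor not nous of off om on once ons onze ook or "
--     "other our ours ourselves out over own pas pour same sich sie so some "
--     "son such sur te than that the their theirs them themselves then there "
--     "these they this those through to too under und une up van very via von "
--     "voor was wat we weer werden what when where which while wie wij will "
--     "with worden would you your yours yourself yourselves ze zelf zich zij "
--     "zo zu".split())
--
--
-- def _is_punct(c):
--     # string.punctuation is exactly the four ASCII ranges below; the module
--     # constant additionally appends the five typographic marks.
--     return ('!' <= c <= '/' or ':' <= c <= '@' or '[' <= c <= '`'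
--             or '{' <= c <= '~' or c in '“”«»’')
--
--
-- def _trim(w):
--     # two-pointer strip of leading/trailing punctuation characters
--     i, j = 0, len(w)
--     while i < j and _is_punct(w[i]):
--         i += 1
--     while j > i and _is_punct(w[j - 1]):
--         j -= 1
--     return w[i:j]
--
--
-- def text_to_unigrams(text):
--     counts = Counter()
--     for tok in text.replace('\r\n', ' ').replace('\n', ' ').split(' '):
--         for sep in (',', '_', '--'):
--             if sep in tok:
--                 parts = tok.split(sep)
--                 break
--         else:
--             parts = [tok]
--         for w in parts:
--             w2 = _trim(w)
--             lw = w2.lower()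
--             if (not w.startswith('0') and w2 and '.' not in w2
--                     and len(w2) >= 4 and lw not in STOPWORDS):
--                 counts[lw] += 1
--     return counts
-- ===== Notes on version B (the rewrite author's own statement) =====
-- stated objective: simpler
-- what changed: Replaces six intermediate list-building passes plus a final Counter over a rebuilt list with one fused loop per space-split token: a for/else search over the three separators, a two-pointer punctuation trim using a range-based punctuation predicate, one combined guard and a direct Counter update.
import Mathlib
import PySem

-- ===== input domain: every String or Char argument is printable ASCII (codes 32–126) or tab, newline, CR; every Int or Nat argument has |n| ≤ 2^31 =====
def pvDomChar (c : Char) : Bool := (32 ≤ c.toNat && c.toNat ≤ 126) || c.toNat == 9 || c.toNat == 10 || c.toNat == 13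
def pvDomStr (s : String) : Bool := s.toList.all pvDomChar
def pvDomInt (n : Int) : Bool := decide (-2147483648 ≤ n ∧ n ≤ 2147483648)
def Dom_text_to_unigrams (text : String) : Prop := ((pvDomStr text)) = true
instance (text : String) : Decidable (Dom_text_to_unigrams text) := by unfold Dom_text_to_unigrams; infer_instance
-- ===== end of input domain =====

set_option maxRecDepth 16384
set_option maxHeartbeats 1000000

-- B replaces A's six list-building passes (+ final Counter over a rebuilt list) with one
-- fused loop per token: a for/else separator search, a two-pointer punctuation trim with a
-- range-based punctuation predicate, one combined guard and a direct Counter update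
-- (objective: simpler).

-- ===== PORT A =====

-- string.punctuation + '“”«»’' (module constant)
def pvPunct : String := "!\"#$%&'()*+,-./:;<=>?@[\\]^_`{|}~“”«»’"

-- STOPWORDS (frozenset of distinct words; membership test only)
def pvStop : List String := [
  "a", "about", "above", "after", "again", "against", "all", "also", "am",
  "an", "and", "any", "are", "as", "at", "be", "because", "been", "before",
  "being", "below", "between", "both", "but", "by", "can", "could", "dans",
  "de", "der", "des", "die", "dit", "do", "does", "doing", "don", "down",
  "du", "during", "een", "eens", "en", "er", "es", "est", "et", "few",
  "for", "from", "further", "had", "has", "have", "having", "he", "her",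
  "here", "hers", "herself", "het", "him", "himself", "his", "how", "ich",
  "if", "ik", "il", "ils", "im", "in", "into", "is", "it", "its", "itself",
  "je", "jij", "jusqu", "la", "le", "les", "me", "meer", "met", "mich",
  "mijn", "moi", "mon", "most", "my", "myself", "naar", "nach", "ne", "niet",
  "no", "nor", "not", "nous", "of", "off", "om", "on", "once", "ons",
  "onze", "ook", "or", "other", "our", "ours", "ourselves", "out", "over",
  "own", "pas", "pour", "same", "sich", "sie", "so", "some", "son", "such",
  "sur", "te", "than", "that", "the", "their", "theirs", "them",
  "themselves", "then", "there", "these", "they", "this", "those", "through",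
  "to", "too", "under", "und", "une", "up", "van", "very", "via", "von",
  "voor", "was", "wat", "we", "weer", "werden", "what", "when", "where",
  "which", "while", "wie", "wij", "will", "with", "worden", "would", "you",
  "your", "yours", "yourself", "yourselves", "ze", "zelf", "zich", "zij",
  "zo", "zu"]

-- 'word_character in punctuation' (a 1-char substring test = char membership; exact)
def pvIsPunct (c : Char) : Bool := pvPunct.toList.contains c

-- the 'for word_character in …: if … break else remove_char += 1' loop of check_start/check_end
def pvCsLoop : List Char → Nat → Nat
  | [], n => n
  | c :: rest, n => if pvIsPunct c then pvCsLoop rest (n + 1) else n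

def check_start (word : String) : String :=
  let rc := pvCsLoop word.toList 0
  if rc = 0 then word
  else if PySem.Str.len word ≤ (rc : Int) then ""
  else PySem.Str.slice word (some (rc : Int)) none

-- word[::-1] iterated = loop over word.toList.reverse (exact); word[:-rc] = slice none (-rc)
def check_end (word : String) : String :=
  let rc := pvCsLoop word.toList.reverse 0
  if rc = 0 then word
  else if PySem.Str.len word ≤ (rc : Int) then ""
  else PySem.Str.slice word none (some (-(rc : Int)))

-- the if/elif split choice of handle_comma_and_dash, per word (each branch extends output)
def pvParts (w : String) : List String :=
  if PySem.Str.isIn "," w then (PySem.Str.split? w ",").getD []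
  else if PySem.Str.isIn "_" w then (PySem.Str.split? w "_").getD []
  else if PySem.Str.isIn "--" w then (PySem.Str.split? w "--").getD []
  else [w]

def handle_comma_and_dash (words : List String) : List String :=
  words.foldl (fun out w => out ++ pvParts w) []

def handle_weird_words (words : List String) : List String :=
  words.foldl (fun out w => if PySem.Str.startswith w "0" then out else out ++ [w]) []

def handle_punctuation (words : List String) : List String :=
  words.foldl (fun out w =>
    let w1 := check_start w
    let w2 := check_end w1
    if w2 == "" then out
    else if PySem.Str.isIn "." w2 then out
    else out ++ [w2]) []

def handle_word_length (words : List String) : List String :=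
  words.foldl (fun out w => if PySem.Str.len w < 4 then out else out ++ [w]) []

def handle_stop_words (words : List String) : List String :=
  words.foldl (fun out w => if pvStop.contains (PySem.Str.lower w) then out else out ++ [w]) []

def text_to_unigrams (text : String) : List (String × Int) :=
  let t1 := PySem.Str.replace text "\r\n" " "
  let t2 := PySem.Str.replace t1 "\n" " "
  -- text.split(' '): sep ≠ "" so split? is always some
  let words0 := ((PySem.Str.split? t2 " ").getD []).filter (fun w => w != "")
  let w1 := handle_comma_and_dash words0
  let w2 := handle_weird_words w1
  let w3 := handle_punctuation w2
  let w4 := handle_word_length w3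
  let w5 := handle_stop_words w4
  let w6 := w5.map PySem.Str.lower
  (PySem.Dict.counter w6).items

-- ===== PORT B =====

-- STOPWORDS: one space-separated literal, split once (Source B builds the frozenset the same way)
def altStop : List String := (PySem.Str.split? "a about above after again against all also am an and any are as at be because been before being below between both but by can could dans de der des die dit do does doing don down du during een eens en er es est et few for from further had has have having he her here hers herself het him himself his how ich if ik il ils im in into is it its itself je jij jusqu la le les me meer met mich mijn moi mon most my myself naar nach ne niet no nor not nous of off om on once ons onze ook or other our ours ourselves out over own pas pour same sich sie so some son such sur te than that the their theirs them themselves then there these they this those through to too under und une up van very via von voor was wat we weer werden what when where which while wie wij will with worden would you your yours yourself yourselves ze zelf zich zij zo zu" " ").getD []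

-- _is_punct: string.punctuation as four ASCII code ranges, plus the five typographic marks
def altIsPunct (c : Char) : Bool :=
  (33 ≤ c.toNat && c.toNat ≤ 47) || (58 ≤ c.toNat && c.toNat ≤ 64) ||
  (91 ≤ c.toNat && c.toNat ≤ 96) || (123 ≤ c.toNat && c.toNat ≤ 126) ||
  c.toNat == 8220 || c.toNat == 8221 || c.toNat == 171 || c.toNat == 187 || c.toNat == 8217

-- the 'while i < j and _is_punct(w[i]): i += 1' pointer advance, as structural recursion
def altTrimFront : List Char → List Char
  | [] => []
  | c :: rest => if altIsPunct c then altTrimFront rest else c :: rest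

-- _trim: advance the front pointer, then the back pointer (= a front advance on the reverse)
def altTrim (w : String) : String :=
  String.ofList ((altTrimFront (altTrimFront w.toList).reverse).reverse)

-- the for/else search over the three separators
def altParts (tok : String) : List String :=
  match [",", "_", "--"].find? (fun sep => PySem.Str.isIn sep tok) with
  | some sep => (PySem.Str.split? tok sep).getD []
  | none => [tok]

def text_to_unigrams_alt (text : String) : List (String × Int) :=
  let toks := (PySem.Str.split? (PySem.Str.replace (PySem.Str.replace text "\r\n" " ") "\n" " ") " ").getD []
  (toks.foldl (fun counts tok =>
      (altParts tok).foldl (fun counts w =>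
        let w2 := altTrim w
        let lw := PySem.Str.lower w2
        if !(PySem.Str.startswith w "0") && w2 != "" && !(PySem.Str.isIn "." w2)
            && decide (4 ≤ PySem.Str.len w2) && !(altStop.contains lw)
        then counts.modify lw 0 (· + 1) else counts) counts) PySem.Dict.empty).items

-- ===== PRECONDITION & SPEC =====
def Spec_text_to_unigrams (text : String) (out : List (String × Int)) : Prop := out = text_to_unigrams_alt text
instance (text : String) (out : List (String × Int)) : Decidable (Spec_text_to_unigrams text out) := by unfold Spec_text_to_unigrams; infer_instance

-- ===== CLAIM (what is proved, stated in full; the proofs are below) =====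
def Claim_equal_text_to_unigrams : Prop := ∀ (text : String), Dom_text_to_unigrams text → Spec_text_to_unigrams text (text_to_unigrams text)

-- ===== LEMMAS AND PROOFS =====

-- the fused per-sub-word cleaning step of A's passes 2–6, as a 0/1-element list
def pvCleanL (w : String) : List String :=
  if PySem.Str.startswith w "0" then []
  else
    let w2 := check_end (check_start w)
    if w2 == "" then []
    else if PySem.Str.isIn "." w2 then []
    else if PySem.Str.len w2 < 4 then []
    else if pvStop.contains (PySem.Str.lower w2) then []
    else [PySem.Str.lower w2]

-- the per-word result of handle_punctuation, as a 0/1-element list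
def pvPunctL (w : String) : List String :=
  let w2 := check_end (check_start w)
  if w2 == "" then []
  else if PySem.Str.isIn "." w2 then []
  else [w2]

-- ---- B's stopword list is A's ----

theorem altStop_eq : altStop = pvStop := by decide

-- ---- B's punctuation predicate is A's ----

theorem char_eq_iff_toNat (c d : Char) : (c = d) ↔ c.toNat = d.toNat := by
  constructor
  · rintro rfl; rfl
  · intro h
    exact Char.ext (UInt32.toNat_inj.mp h)

theorem altIsPunct_eq (c : Char) : altIsPunct c = pvIsPunct c := by
  have h : pvPunct.toList = ['!','"','#','$','%','&','\'','(',')','*','+',',','-','.','/',':',';','<','=','>','?','@','[','\\',']','^','_','`','{','|','}','~','“','”','«','»','’'] := by decide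
  rw [Bool.eq_iff_iff]
  simp only [pvIsPunct, h, altIsPunct, List.contains_cons, List.contains_nil,
    Bool.or_eq_true, Bool.and_eq_true, decide_eq_true_eq, beq_iff_eq, char_eq_iff_toNat,
    Char.reduceToNat, Bool.false_eq_true, or_false, or_assoc]
  constructor
  · intro h2
    rcases h2 with h2|h2|h2|h2|h2|h2|h2|h2|h2 <;> omega
  · intro h2
    rcases h2 with h2|h2|h2|h2|h2|h2|h2|h2|h2|h2|h2|h2|h2|h2|h2|h2|h2|h2|h2|h2|h2|h2|h2|h2|h2|h2|h2|h2|h2|h2|h2|h2|h2|h2|h2|h2 <;> omega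

-- ---- B's two-pointer trim is A's check_start/check_end composition ----

theorem altTrimFront_eq (cs : List Char) : altTrimFront cs = cs.dropWhile pvIsPunct := by
  induction cs with
  | nil => rfl
  | cons c rest ih =>
    rw [altTrimFront, altIsPunct_eq, List.dropWhile_cons]
    by_cases h : pvIsPunct c <;> simp [h, ih]

theorem pvCsLoop_eq (cs : List Char) (n : Nat) :
    pvCsLoop cs n = n + (cs.takeWhile pvIsPunct).length := by
  induction cs generalizing n with
  | nil => simp [pvCsLoop]
  | cons c rest ih =>
    by_cases h : pvIsPunct c <;> simp [pvCsLoop, h, ih] <;> omega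

theorem pv_dropWhile_eq_drop (p : Char → Bool) (cs : List Char) :
    cs.dropWhile p = cs.drop (cs.takeWhile p).length := by
  induction cs with
  | nil => simp
  | cons c rest ih =>
    by_cases h : p c <;> simp [List.dropWhile_cons, h, ih]

theorem pv_len_takeWhile_le (p : Char → Bool) (cs : List Char) :
    (cs.takeWhile p).length ≤ cs.length := by
  exact (List.takeWhile_sublist p).length_le

theorem check_start_toList (w : String) :
    (check_start w).toList = w.toList.dropWhile pvIsPunct := by
  unfold check_start
  rw [pvCsLoop_eq]
  set cs := w.toList with hcs
  set rc := (cs.takeWhile pvIsPunct).length with hrc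
  have hle : rc ≤ cs.length := pv_len_takeWhile_le _ _
  have hlen : PySem.Str.len w = (cs.length : Int) := by
    simp [PySem.Str.len, hcs]
  rw [pv_dropWhile_eq_drop, ← hrc]
  by_cases h0 : (0 : Nat) + rc = 0
  · rw [if_pos h0]
    have : rc = 0 := by omega
    simp only [this, List.drop_zero]
    exact hcs.symm
  · rw [if_neg h0]
    by_cases h1 : PySem.Str.len w ≤ ((0 + rc : Nat) : Int)
    · rw [if_pos h1]
      have : cs.length ≤ rc := by rw [hlen] at h1; exact_mod_cast (by simpa using h1)
      have hdrop : cs.drop rc = [] := by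
        apply List.drop_eq_nil_of_le; omega
      simp [hdrop]
    · rw [if_neg h1]
      have hlt : rc < cs.length := by
        rw [hlen] at h1; push_neg at h1; exact_mod_cast (by simpa using h1)
      rw [PySem.Str.toList_slice]
      simp only [PySem.Chars.slice_eq_listSlice]
      have he : ((0 + rc : Nat) : Int) = ((rc : Nat) : Int) := by omega
      rw [he, PySem.List.slice_from _ (by positivity), Int.toNat_natCast]

theorem pv_slice_to_neg (cs : List Char) (n : Nat) (h0 : 0 < n) (h1 : n < cs.length) :
    PySem.List.slice cs none (some (-(n : Int))) = cs.take (cs.length - n) := by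
  simp only [PySem.List.slice, PySem.List.clampIdx]
  have h3 : (-(n : Int) < 0) := by omega
  have h2 : ¬((cs.length : Int) + -(n : Int) < 0) := by omega
  rw [if_pos h3, if_neg h2]
  simp only [List.drop_zero]
  congr 1
  omega

theorem check_end_toList (w : String) :
    (check_end w).toList = (w.toList.reverse.dropWhile pvIsPunct).reverse := by
  unfold check_end
  rw [pvCsLoop_eq]
  set cs := w.toList with hcs
  set rc := (cs.reverse.takeWhile pvIsPunct).length with hrc
  have hle : rc ≤ cs.length := by
    have := pv_len_takeWhile_le pvIsPunct cs.reverse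
    simpa using this
  have hlen : PySem.Str.len w = (cs.length : Int) := by
    simp [PySem.Str.len, hcs]
  rw [pv_dropWhile_eq_drop, ← hrc]
  by_cases h0 : (0 : Nat) + rc = 0
  · rw [if_pos h0]
    have : rc = 0 := by omega
    simp only [this, List.drop_zero, List.reverse_reverse]
    exact hcs.symm
  · rw [if_neg h0]
    by_cases h1 : PySem.Str.len w ≤ ((0 + rc : Nat) : Int)
    · rw [if_pos h1]
      have : cs.length ≤ rc := by rw [hlen] at h1; exact_mod_cast (by simpa using h1)
      have hdrop : cs.reverse.drop rc = [] := by
        apply List.drop_eq_nil_of_le; simpa using this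
      simp [hdrop]
    · rw [if_neg h1]
      have hlt : rc < cs.length := by
        rw [hlen] at h1; push_neg at h1; exact_mod_cast (by simpa using h1)
      rw [PySem.Str.toList_slice]
      simp only [PySem.Chars.slice_eq_listSlice]
      have he : ((0 + rc : Nat) : Int) = ((rc : Nat) : Int) := by omega
      rw [he, pv_slice_to_neg cs rc (by omega) hlt]
      rw [List.drop_reverse, List.reverse_reverse]

theorem altTrim_eq (w : String) : altTrim w = check_end (check_start w) := by
  apply String.ext
  have h1 : (String.ofList ((altTrimFront (altTrimFront w.toList).reverse).reverse)).toList
      = (altTrimFront (altTrimFront w.toList).reverse).reverse := by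
    simp
  rw [altTrim, h1, check_end_toList, check_start_toList, altTrimFront_eq, altTrimFront_eq]

-- ---- B's separator search is A's if/elif chain ----

theorem altParts_eq (tok : String) : altParts tok = pvParts tok := by
  unfold altParts pvParts
  simp only [List.find?]
  cases h1 : PySem.Str.isIn "," tok
  · cases h2 : PySem.Str.isIn "_" tok
    · cases h3 : PySem.Str.isIn "--" tok <;> simp [h1, h2, h3]
    · simp [h1, h2]
  · simp [h1]

-- ---- A's staged passes, each as a filter / flatMap ----

theorem handle_comma_and_dash_eq (ws : List String) :
    handle_comma_and_dash ws = ws.flatMap pvParts := by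
  unfold handle_comma_and_dash
  simpa using PySem.List.foldl_append_eq_flatMap pvParts ws []

theorem handle_weird_words_eq (ws : List String) :
    handle_weird_words ws = ws.filter (fun w => !PySem.Str.startswith w "0") := by
  suffices h : ∀ (l : List String) (out : List String),
      l.foldl (fun out w => if PySem.Str.startswith w "0" then out else out ++ [w]) out
        = out ++ l.filter (fun w => !PySem.Str.startswith w "0") by
    simpa [handle_weird_words] using h ws []
  intro l
  induction l with
  | nil => intro out; simp
  | cons w rest ih =>
    intro out
    rw [List.foldl_cons, List.filter_cons]
    cases h : PySem.Str.startswith w "0" <;>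
      simp only [h, Bool.false_eq_true, if_false, if_true, Bool.not_false, Bool.not_true, ih,
        List.append_assoc, List.singleton_append]

theorem handle_word_length_eq (ws : List String) :
    handle_word_length ws = ws.filter (fun w => !decide (PySem.Str.len w < 4)) := by
  suffices h : ∀ (l : List String) (out : List String),
      l.foldl (fun out w => if PySem.Str.len w < 4 then out else out ++ [w]) out
        = out ++ l.filter (fun w => !decide (PySem.Str.len w < 4)) by
    simpa [handle_word_length] using h ws []
  intro l
  induction l with
  | nil => intro out; simp
  | cons w rest ih =>
    intro out
    rw [List.foldl_cons, List.filter_cons]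
    by_cases h : PySem.Str.len w < 4
    · simp only [if_pos h, decide_eq_true h, Bool.not_true, Bool.false_eq_true, if_false, ih]
    · simp only [if_neg h, decide_eq_false h, Bool.not_false, if_true, ih,
        List.append_assoc, List.singleton_append]

theorem handle_stop_words_eq (ws : List String) :
    handle_stop_words ws = ws.filter (fun w => !pvStop.contains (PySem.Str.lower w)) := by
  suffices h : ∀ (l : List String) (out : List String),
      l.foldl (fun out w => if pvStop.contains (PySem.Str.lower w) then out else out ++ [w]) out
        = out ++ l.filter (fun w => !pvStop.contains (PySem.Str.lower w)) by
    simpa [handle_stop_words] using h ws []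
  intro l
  induction l with
  | nil => intro out; simp
  | cons w rest ih =>
    intro out
    rw [List.foldl_cons, List.filter_cons]
    cases h : pvStop.contains (PySem.Str.lower w) <;>
      simp only [h, Bool.not_true, Bool.not_false, Bool.false_eq_true, if_false, if_true, ih,
        List.append_assoc, List.singleton_append]

theorem handle_punctuation_eq (ws : List String) :
    handle_punctuation ws = ws.flatMap pvPunctL := by
  suffices h : ∀ (l : List String) (out : List String),
      l.foldl (fun out w =>
        let w1 := check_start w
        let w2 := check_end w1
        if w2 == "" then out
        else if PySem.Str.isIn "." w2 then out
        else out ++ [w2]) out = out ++ l.flatMap pvPunctL by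
    simpa [handle_punctuation] using h ws []
  intro l
  induction l with
  | nil => intro out; simp
  | cons w rest ih =>
    intro out
    rw [List.foldl_cons, List.flatMap_cons]
    have hb : (let w1 := check_start w
        let w2 := check_end w1
        if w2 == "" then out
        else if PySem.Str.isIn "." w2 then out
        else out ++ [w2]) = out ++ pvPunctL w := by
      simp only [pvPunctL]
      cases h1 : check_end (check_start w) == ""
      · cases h2 : PySem.Str.isIn "." (check_end (check_start w)) <;>
          simp [h1, h2]
      · simp [h1]
    rw [hb, ih, List.append_assoc]

-- per-word fusion of passes 3–6 (for a word that passed the startswith('0') guard)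
theorem pv_elem_fuse (w : String) (h0 : PySem.Str.startswith w "0" = false) :
    (((pvPunctL w).filter (fun v => !decide (PySem.Str.len v < 4))).filter
      (fun v => !pvStop.contains (PySem.Str.lower v))).map PySem.Str.lower = pvCleanL w := by
  simp only [pvPunctL, pvCleanL, h0, Bool.false_eq_true, if_false]
  cases h1 : check_end (check_start w) == ""
  · simp only [h1, Bool.false_eq_true, if_false]
    cases h2 : PySem.Str.isIn "." (check_end (check_start w))
    · simp only [h2, Bool.false_eq_true, if_false]
      by_cases h3 : PySem.Str.len (check_end (check_start w)) < 4
      · simp only [if_pos h3, List.filter_cons, decide_eq_true h3, Bool.not_true,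
          Bool.false_eq_true, if_false, List.filter_nil, List.map_nil]
      · simp only [if_neg h3, List.filter_cons, decide_eq_false h3, Bool.not_false, if_true,
          List.filter_nil]
        cases h4 : pvStop.contains (PySem.Str.lower (check_end (check_start w)))
        · simp only [List.filter_cons, h4, Bool.not_false, if_true, Bool.false_eq_true, if_false,
            List.filter_nil, List.map_cons, List.map_nil]
        · simp only [List.filter_cons, h4, Bool.not_true, Bool.false_eq_true, if_false, if_true,
            List.filter_nil, List.map_nil]
    · simp only [h2, if_true, List.filter_nil, List.map_nil]
  · simp only [h1, if_true, List.filter_nil, List.map_nil]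

-- fusing A's passes 2–6 into the single per-sub-word step pvCleanL
theorem pv_fuse (ws : List String) :
    (handle_stop_words (handle_word_length (handle_punctuation
      (handle_weird_words ws)))).map PySem.Str.lower = ws.flatMap pvCleanL := by
  rw [handle_weird_words_eq, handle_punctuation_eq, handle_word_length_eq, handle_stop_words_eq]
  induction ws with
  | nil => simp
  | cons w ws ih =>
    rw [List.filter_cons, List.flatMap_cons]
    cases h0 : PySem.Str.startswith w "0"
    · simp only [Bool.not_false, if_true, List.flatMap_cons, List.filter_append, List.map_append, ih]
      rw [pv_elem_fuse w h0]
    · simp only [Bool.not_true, Bool.false_eq_true, if_false, ih]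
      have : pvCleanL w = [] := by simp only [pvCleanL, h0, if_true]
      rw [this, List.nil_append]

-- ---- B's fused loop body ----

-- the Counter update step shared by Counter(words) and B's loop
def pvStep (d : PySem.Dict String Int) (x : String) : PySem.Dict String Int :=
  d.modify x 0 (· + 1)

-- B's per-sub-word body is the fold of pvStep over pvCleanL
theorem pv_inner_eq (d : PySem.Dict String Int) (w : String) :
    (let w2 := altTrim w
     let lw := PySem.Str.lower w2
     if !(PySem.Str.startswith w "0") && w2 != "" && !(PySem.Str.isIn "." w2)
         && decide (4 ≤ PySem.Str.len w2) && !(altStop.contains lw)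
     then d.modify lw 0 (· + 1) else d)
    = (pvCleanL w).foldl pvStep d := by
  simp only [altTrim_eq, altStop_eq, pvCleanL, bne]
  cases h0 : PySem.Str.startswith w "0"
  · simp only [Bool.not_false, Bool.true_and, Bool.false_eq_true, if_false]
    cases h1 : check_end (check_start w) == ""
    · simp only [Bool.not_false, Bool.true_and, Bool.false_eq_true, if_false]
      cases h2 : PySem.Str.isIn "." (check_end (check_start w))
      · simp only [Bool.not_false, Bool.true_and, Bool.false_eq_true, if_false]
        cases h3 : decide (4 ≤ PySem.Str.len (check_end (check_start w)))
        · have h3' : PySem.Str.len (check_end (check_start w)) < 4 := by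
            have := of_decide_eq_false h3; omega
          simp only [Bool.false_and, Bool.false_eq_true, if_false, if_pos h3', List.foldl_nil]
        · have h3' : ¬ (PySem.Str.len (check_end (check_start w)) < 4) := by
            have := of_decide_eq_true h3; omega
          simp only [Bool.true_and, if_neg h3']
          cases h4 : pvStop.contains (PySem.Str.lower (check_end (check_start w)))
          · simp only [Bool.not_false, if_true, Bool.false_eq_true, if_false,
              List.foldl_cons, List.foldl_nil, pvStep]
          · simp only [Bool.not_true, Bool.and_false, Bool.false_eq_true, if_false, if_true,
              List.foldl_nil]
      · simp only [Bool.not_true, Bool.false_and, Bool.and_false, Bool.false_eq_true, if_false,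
          if_true, List.foldl_nil]
    · simp only [Bool.not_true, Bool.false_and, Bool.and_false, Bool.false_eq_true, if_false,
        if_pos rfl, eq_self_iff_true, if_true, List.foldl_nil]
  · simp only [Bool.not_true, Bool.false_and, Bool.false_eq_true, if_false, if_pos rfl,
      eq_self_iff_true, if_true, List.foldl_nil]

-- empty sub-words and empty tokens contribute nothing
theorem pvCleanL_empty : pvCleanL "" = [] := by decide

theorem pvParts_empty : pvParts "" = [""] := by decide

theorem pv_filter_flatMap (g : String → List String) (hg : g "" = []) (toks : List String) :
    (toks.filter (fun w => w != "")).flatMap g = toks.flatMap g := by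
  induction toks with
  | nil => rfl
  | cons t rest ih =>
    rw [List.filter_cons, List.flatMap_cons]
    by_cases h : t = ""
    · have hb : (t != "") = false := by simp [h]
      rw [hb, if_neg (by simp), ih, h, hg, List.nil_append]
    · have hb : (t != "") = true := by simpa using h
      rw [hb, if_pos rfl, List.flatMap_cons, ih]

-- B's outer loop = folding pvStep over the flattened cleaned stream
theorem pv_outer_eq (toks : List String) (d : PySem.Dict String Int) :
    toks.foldl (fun counts tok =>
      (altParts tok).foldl (fun counts w =>
        let w2 := altTrim w
        let lw := PySem.Str.lower w2
        if !(PySem.Str.startswith w "0") && w2 != "" && !(PySem.Str.isIn "." w2)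
            && decide (4 ≤ PySem.Str.len w2) && !(altStop.contains lw)
        then counts.modify lw 0 (· + 1) else counts) counts) d
    = (toks.flatMap (fun t => (pvParts t).flatMap pvCleanL)).foldl pvStep d := by
  have hin : (fun (counts : PySem.Dict String Int) (w : String) =>
      let w2 := altTrim w
      let lw := PySem.Str.lower w2
      if !(PySem.Str.startswith w "0") && w2 != "" && !(PySem.Str.isIn "." w2)
          && decide (4 ≤ PySem.Str.len w2) && !(altStop.contains lw)
      then counts.modify lw 0 (· + 1) else counts)
      = (fun counts w => (pvCleanL w).foldl pvStep counts) :=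
    funext fun c => funext fun w => pv_inner_eq c w
  induction toks generalizing d with
  | nil => rfl
  | cons tok rest ih =>
    rw [List.foldl_cons, List.flatMap_cons, List.foldl_append, ih]
    congr 1
    rw [altParts_eq, hin, List.foldl_flatMap]

-- ===== VERDICT (by name: the statement is the Claim_ definition above) =====
theorem text_to_unigrams_spec : Claim_equal_text_to_unigrams := by
  intro text _
  unfold Spec_text_to_unigrams text_to_unigrams text_to_unigrams_alt
  simp only []
  rw [pv_outer_eq]
  rw [handle_comma_and_dash_eq, pv_fuse, List.flatMap_assoc]
  rw [pv_filter_flatMap _ (by rw [pvParts_empty]; simp [pvCleanL_empty])]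
  rw [PySem.Dict.counter_eq_foldl]
  rfl
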